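-- pv_equiv track=rewrite | github.com/niharikanm18/Data-Governance-Framework | src/lineage/lineage_tracker.py | _extract_target_tables
-- ===== SOURCE A (Python) =====
-- from typing import List, Dict, Any, Set, Tuple
--
-- def _extract_target_tables(query_text: str) -> Set[str]:
--     """Extract target table names from query text."""
--     targets = set()
--
--     # Look for INSERT INTO, CREATE TABLE, MERGE INTO patterns
--     if 'INSERT INTO' in query_text:
--         parts = query_text.split('INSERT INTO')
--         for i in range(1, len(parts)):
--             tokens = parts[i].strip().split()
--             if tokens:
--                 targets.add(tokens[0].strip('(),;'))
--
--     if 'CREATE TABLE' in query_text: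
--         parts = query_text.split('CREATE TABLE')
--         for i in range(1, len(parts)):
--             tokens = parts[i].strip().split()
--             if tokens and tokens[0] not in ['IF', 'OR']:
--                 targets.add(tokens[0].strip('(),;'))
--
--     if 'MERGE INTO' in query_text:
--         parts = query_text.split('MERGE INTO')
--         for i in range(1, len(parts)):
--             tokens = parts[i].strip().split()
--             if tokens:
--                 targets.add(tokens[0].strip('(),;'))
--
--     return targets
-- ===== SOURCE B (Python) =====
-- def _extract_target_tables(query_text: str):
--     """Extract target table names from query text (single forward scan per keyword,
--     no intermediate parts/tokens lists)."""
--     targets = set()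
--     for kw, banned in (('INSERT INTO', ()), ('CREATE TABLE', ('IF', 'OR')),
--                        ('MERGE INTO', ())):
--         text = query_text
--         while True:
--             i = text.find(kw)
--             if i == -1:
--                 break
--             rest = text[i + len(kw):]
--             nxt = rest.find(kw)
--             seg = rest if nxt == -1 else rest[:nxt]
--             a = 0
--             while a < len(seg) and seg[a].isspace():
--                 a += 1
--             b = a
--             while b < len(seg) and not seg[b].isspace():
--                 b += 1
--             token = seg[a:b]
--             if token and token not in banned:
--                 targets.add(token.strip('(),;'))
--             text = rest
--     return targets
-- ===== Notes on version B (the rewrite author's own statement) =====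
-- stated objective: alternative
-- what changed: Instead of three split()-passes that materialise a parts list and a tokens list per part, B does one forward find()-scan per keyword, slicing out only the segment up to the next occurrence and extracting its first whitespace-delimited token in place.
import Mathlib
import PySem

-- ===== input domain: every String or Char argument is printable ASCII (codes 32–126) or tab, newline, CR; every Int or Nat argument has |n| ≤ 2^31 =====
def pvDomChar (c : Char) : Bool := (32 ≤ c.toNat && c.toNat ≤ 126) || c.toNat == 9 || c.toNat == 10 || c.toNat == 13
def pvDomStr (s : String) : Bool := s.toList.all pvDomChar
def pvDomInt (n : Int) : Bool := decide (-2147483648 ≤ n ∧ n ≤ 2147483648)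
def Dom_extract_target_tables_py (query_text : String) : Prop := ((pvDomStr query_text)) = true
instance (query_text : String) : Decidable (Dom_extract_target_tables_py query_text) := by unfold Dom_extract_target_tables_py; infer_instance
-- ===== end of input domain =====

-- B replaces A's three split-and-tokenize passes (materialising parts and tokens lists)
-- by a per-keyword forward scan with find that extracts the following token in place;
-- objective: alternative (same result, no intermediate lists).

-- ===== PORT A =====
-- Literal transliteration of _extract_target_tables: three guarded blocks, each splitting
-- on the keyword, tokenising each later part with strip().split(), adding tokens[0].strip('(),;').
def extract_target_tables_py (query_text : String) : List String :=
  let q := query_text.toList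
  let targets : PySem.Set (List Char) := PySem.Set.empty
  let targets :=
    if PySem.Chars.isIn ("INSERT INTO".toList) q then
      ((PySem.Chars.splitOn q ("INSERT INTO".toList)).drop 1).foldl (fun t part =>
        match PySem.Chars.split₀ (PySem.Chars.strip part) with
        | [] => t
        | tok :: _ => PySem.Set.add t (PySem.Chars.stripChars tok ("(),;".toList))) targets
    else targets
  let targets :=
    if PySem.Chars.isIn ("CREATE TABLE".toList) q then
      ((PySem.Chars.splitOn q ("CREATE TABLE".toList)).drop 1).foldl (fun t part =>
        match PySem.Chars.split₀ (PySem.Chars.strip part) with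
        | [] => t
        | tok :: _ =>
          if ["IF".toList, "OR".toList].contains tok then t
          else PySem.Set.add t (PySem.Chars.stripChars tok ("(),;".toList))) targets
    else targets
  let targets :=
    if PySem.Chars.isIn ("MERGE INTO".toList) q then
      ((PySem.Chars.splitOn q ("MERGE INTO".toList)).drop 1).foldl (fun t part =>
        match PySem.Chars.split₀ (PySem.Chars.strip part) with
        | [] => t
        | tok :: _ => PySem.Set.add t (PySem.Chars.stripChars tok ("(),;".toList))) targets
    else targets
  targets.map String.ofList

-- ===== PORT B =====
-- Source B's inner while-loop: find the next keyword occurrence, cut out the segment up to the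
-- following occurrence, take its first whitespace-delimited token (the two index while-loops
-- are ported as dropWhile/takeWhile), then continue on the rest.  The kw = [] guard only
-- makes the recursion total (every keyword B passes is non-empty).
def pvScanKw (kw : List Char) (banned : List (List Char)) (text : List Char)
    (targets : PySem.Set (List Char)) : PySem.Set (List Char) :=
  if hkw : kw = [] then targets
  else
    if hf : PySem.Chars.find text kw = -1 then targets
    else
      let i := (PySem.Chars.find text kw).toNat
      let rest := text.drop (i + kw.length)
      let nxt := PySem.Chars.find rest kw
      let seg := if nxt = -1 then rest else rest.take nxt.toNat
      let token := (seg.dropWhile (fun c => PySem.Chars.isspace c)).takeWhile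
        (fun c => !PySem.Chars.isspace c)
      let targets :=
        if token ≠ [] ∧ banned.contains token = false then
          PySem.Set.add targets (PySem.Chars.stripChars token ("(),;".toList))
        else targets
      pvScanKw kw banned rest targets
termination_by text.length
decreasing_by
  have hkw' : 0 < kw.length := List.length_pos_iff.mpr hkw
  have htext : text ≠ [] := by
    intro h
    subst h
    have : kw <:+: ([] : List Char) := (PySem.Chars.find_ne_neg_one_iff _ _).mp hf
    exact hkw (List.eq_nil_of_infix_nil this)
  have : 0 < text.length := List.length_pos_iff.mpr htext
  simp only [List.length_drop]
  omega

def extract_target_tables_py_alt (query_text : String) : List String :=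
  let q := query_text.toList
  let targets :=
    ([(("INSERT INTO".toList), ([] : List (List Char))),
      (("CREATE TABLE".toList), ["IF".toList, "OR".toList]),
      (("MERGE INTO".toList), ([] : List (List Char)))]).foldl
      (fun t p => pvScanKw p.1 p.2 q t) PySem.Set.empty
  targets.map String.ofList

-- ===== PRECONDITION & SPEC =====
def Spec_extract_target_tables_py (query_text : String) (out : List String) : Prop := out = extract_target_tables_py_alt query_text
instance (query_text : String) (out : List String) : Decidable (Spec_extract_target_tables_py query_text out) := by unfold Spec_extract_target_tables_py; infer_instance

-- ===== CLAIM (what is proved, stated in full; the proofs are below) =====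
def Claim_equal_extract_target_tables_py : Prop := ∀ (query_text : String), Dom_extract_target_tables_py query_text → Spec_extract_target_tables_py query_text (extract_target_tables_py query_text)

-- ===== LEMMAS AND PROOFS =====

-- A's per-part body, parameterised by the banned-token list ([] for INSERT/MERGE).
def pvProc (banned : List (List Char)) (t : PySem.Set (List Char)) (part : List Char) :
    PySem.Set (List Char) :=
  match PySem.Chars.split₀ (PySem.Chars.strip part) with
  | [] => t
  | tok :: _ =>
    if banned.contains tok then t
    else PySem.Set.add t (PySem.Chars.stripChars tok ("(),;".toList))


theorem pv_find_go (sub : List Char) (hsub : sub ≠ []) :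
    ∀ (l : List Char) (k : Nat), PySem.Chars.find.go sub l k =
      if PySem.Chars.find l sub = -1 then -1 else k + PySem.Chars.find l sub := by
  intro l
  induction l with
  | nil =>
    intro k
    simp [PySem.Chars.find.go, PySem.Chars.find, List.isEmpty_iff, hsub]
  | cons c t ih =>
    intro k
    by_cases hp : sub.isPrefixOf (c :: t)
    · simp [PySem.Chars.find.go, PySem.Chars.find, hp]
    · have hne : -1 ≤ PySem.Chars.find t sub := PySem.Chars.neg_one_le_find t sub
      have h1 : PySem.Chars.find.go sub (c :: t) k = PySem.Chars.find.go sub t (k + 1) := by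
        rw [PySem.Chars.find.go.eq_def]
        simp [hp]
      have h2 : PySem.Chars.find (c :: t) sub = PySem.Chars.find.go sub t 1 := by
        rw [PySem.Chars.find, PySem.Chars.find.go.eq_def]
        simp [hp, ih 1]
      rw [h1, h2, ih, ih]
      by_cases hm : PySem.Chars.find t sub = -1 <;> simp [hm] <;> omega

theorem pv_find_prefix {kw l : List Char} (h : kw.isPrefixOf l) :
    PySem.Chars.find l kw = 0 := by
  cases l with
  | nil =>
    have : kw = [] := by simpa using (List.isPrefixOf_iff_prefix.mp h)
    subst this
    simp [PySem.Chars.find, PySem.Chars.find.go]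
  | cons c t =>
    rw [PySem.Chars.find, PySem.Chars.find.go.eq_def]
    simp [h]

theorem pv_find_cons {kw : List Char} (hkw : kw ≠ []) {c : Char} {t : List Char}
    (h : ¬ kw.isPrefixOf (c :: t)) :
    PySem.Chars.find (c :: t) kw =
      if PySem.Chars.find t kw = -1 then -1 else 1 + PySem.Chars.find t kw := by
  rw [PySem.Chars.find, PySem.Chars.find.go.eq_def]
  simp [h, pv_find_go kw hkw]

theorem pv_modifyHead_comp {α : Type} (f g : α → α) (l : List α) :
    (l.modifyHead g).modifyHead f = l.modifyHead (fun x => f (g x)) := by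
  cases l <;> simp

theorem pv_modifyHead_idfun {α : Type} (l : List α) :
    l.modifyHead (fun x => x) = l := by
  cases l <;> simp

theorem pv_splitOn_go (kw : List Char) (hkw : kw ≠ []) :
    ∀ (fuel : Nat) (l cur : List Char) (acc : List (List Char)), l.length < fuel →
      PySem.Chars.splitOn.go kw fuel l cur acc =
        acc.reverse ++ (PySem.Chars.splitOn l kw).modifyHead (cur.reverse ++ ·) := by
  intro fuel
  induction fuel using Nat.strong_induction_on with
  | _ fuel ih =>
  intro l cur acc h
  match fuel, h with
  | f + 1, h =>
  cases l with
  | nil =>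
    rw [PySem.Chars.splitOn.go.eq_def]
    simp [PySem.Chars.splitOn, PySem.Chars.splitOn.go]
  | cons c rest =>
    have hkl : 0 < kw.length := List.length_pos_iff.mpr hkw
    have hdrop : ∀ g : Nat, rest.length < g → ((c :: rest).drop kw.length).length < g := by
      intro g hg
      simp only [List.length_drop, List.length_cons]
      omega
    by_cases hp : kw.isPrefixOf (c :: rest)
    · have hstep : ∀ (g : Nat) (cur' : List Char) (acc' : List (List Char)),
          PySem.Chars.splitOn.go kw (g + 1) (c :: rest) cur' acc' =
            PySem.Chars.splitOn.go kw g ((c :: rest).drop kw.length) [] (cur'.reverse :: acc') := by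
        intro g cur' acc'
        rw [PySem.Chars.splitOn.go.eq_def]
        simp [hp]
      have hsplit : PySem.Chars.splitOn (c :: rest) kw =
          [] :: PySem.Chars.splitOn ((c :: rest).drop kw.length) kw := by
        rw [PySem.Chars.splitOn, List.length_cons, hstep,
          ih _ (by simp at h; omega) _ _ _ (hdrop _ (by omega))]
        simp
        rw [pv_modifyHead_idfun]
      rw [hstep, ih _ (by omega) _ _ _ (hdrop _ (by simp at h; omega)), hsplit]
      simp
      rw [pv_modifyHead_idfun]
    · have hstep : ∀ (g : Nat) (cur' : List Char) (acc' : List (List Char)),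
          PySem.Chars.splitOn.go kw (g + 1) (c :: rest) cur' acc' =
            PySem.Chars.splitOn.go kw g rest (c :: cur') acc' := by
        intro g cur' acc'
        rw [PySem.Chars.splitOn.go.eq_def]
        simp [hp]
      have hsplit : PySem.Chars.splitOn (c :: rest) kw =
          (PySem.Chars.splitOn rest kw).modifyHead (c :: ·) := by
        rw [PySem.Chars.splitOn, List.length_cons, hstep,
          ih _ (by simp at h; omega) _ _ _ (by omega)]
        simp [pv_modifyHead_comp]
      rw [hstep, ih _ (by omega) _ _ _ (by simp at h; omega), hsplit, pv_modifyHead_comp]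
      simp [pv_modifyHead_idfun, List.modifyHead_id]

theorem pv_find_nil {kw : List Char} (hkw : kw ≠ []) : PySem.Chars.find [] kw = -1 := by
  simp [PySem.Chars.find, PySem.Chars.find.go, List.isEmpty_iff, hkw]

theorem pv_splitOn_prefix {kw : List Char} (hkw : kw ≠ []) {l : List Char}
    (h : kw.isPrefixOf l) :
    PySem.Chars.splitOn l kw = [] :: PySem.Chars.splitOn (l.drop kw.length) kw := by
  cases l with
  | nil =>
    exfalso
    have : kw = [] := by simpa using List.isPrefixOf_iff_prefix.mp h
    exact hkw this
  | cons c rest =>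
    have hkl : 0 < kw.length := List.length_pos_iff.mpr hkw
    rw [PySem.Chars.splitOn, List.length_cons, PySem.Chars.splitOn.go.eq_def]
    simp only [h, if_pos]
    rw [pv_splitOn_go kw hkw _ _ _ _ (by simp; omega)]
    simp
    rw [pv_modifyHead_idfun]

theorem pv_splitOn_cons {kw : List Char} (hkw : kw ≠ []) {c : Char} {t : List Char}
    (h : ¬ kw.isPrefixOf (c :: t)) :
    PySem.Chars.splitOn (c :: t) kw = (PySem.Chars.splitOn t kw).modifyHead (c :: ·) := by
  rw [PySem.Chars.splitOn, List.length_cons, PySem.Chars.splitOn.go.eq_def]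
  simp only [h, if_neg]
  rw [pv_splitOn_go kw hkw (t.length + 1) t [c] [] (by omega)]
  simp

theorem pv_splitOn_no_occ {kw : List Char} (hkw : kw ≠ []) :
    ∀ {l : List Char}, PySem.Chars.find l kw = -1 → PySem.Chars.splitOn l kw = [l] := by
  intro l
  induction l with
  | nil =>
    intro _
    simp [PySem.Chars.splitOn, PySem.Chars.splitOn.go]
  | cons c t ih =>
    intro hf
    have hp : ¬ kw.isPrefixOf (c :: t) := by
      intro hp
      rw [pv_find_prefix hp] at hf
      exact absurd hf (by norm_num)
    have hft : PySem.Chars.find t kw = -1 := by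
      rw [pv_find_cons hkw hp] at hf
      by_cases hm : PySem.Chars.find t kw = -1
      · exact hm
      · have := PySem.Chars.neg_one_le_find t kw
        simp [hm] at hf
        omega
    rw [pv_splitOn_cons hkw hp, ih hft]
    simp

theorem pv_splitOn_occ {kw : List Char} (hkw : kw ≠ []) :
    ∀ {l : List Char}, PySem.Chars.find l kw ≠ -1 →
      PySem.Chars.splitOn l kw =
        l.take (PySem.Chars.find l kw).toNat ::
          PySem.Chars.splitOn (l.drop ((PySem.Chars.find l kw).toNat + kw.length)) kw := by
  intro l
  induction l with
  | nil => intro hf; exact absurd (pv_find_nil hkw) hf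
  | cons c t ih =>
    intro hf
    by_cases hp : kw.isPrefixOf (c :: t)
    · rw [pv_find_prefix hp]
      simpa using pv_splitOn_prefix hkw hp
    · have hcons := pv_find_cons hkw (h := hp)
      have hft : PySem.Chars.find t kw ≠ -1 := by
        intro hm
        rw [hcons, if_pos hm] at hf
        exact hf rfl
      have hge : 0 ≤ PySem.Chars.find t kw := by
        have := PySem.Chars.neg_one_le_find t kw
        omega
      have hval : PySem.Chars.find (c :: t) kw = 1 + PySem.Chars.find t kw := by
        rw [hcons, if_neg hft]
      have htn : (PySem.Chars.find (c :: t) kw).toNat = (PySem.Chars.find t kw).toNat + 1 := by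
        rw [hval]; omega
      rw [pv_splitOn_cons hkw hp, ih hft, htn]
      simp only [List.modifyHead_cons, List.take_succ_cons]
      rw [show (PySem.Chars.find t kw).toNat + 1 + kw.length
            = ((PySem.Chars.find t kw).toNat + kw.length) + 1 by omega, List.drop_succ_cons]

def pvW (q : List Char) : List Char :=
  (q.dropWhile (fun c => PySem.Chars.isspace c)).takeWhile (fun c => !PySem.Chars.isspace c)

theorem pv_split0_go_acc :
    ∀ (q cur : List Char) (acc : List (List Char)),
      PySem.Chars.split₀.go q cur acc = acc.reverse ++ PySem.Chars.split₀.go q cur [] := by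
  intro q
  induction q with
  | nil =>
    intro cur acc
    rw [PySem.Chars.split₀.go.eq_def, PySem.Chars.split₀.go.eq_def]
    by_cases hc : cur.isEmpty <;> simp [hc]
  | cons c rest ih =>
    intro cur acc
    rw [PySem.Chars.split₀.go.eq_def]
    conv_rhs => rw [PySem.Chars.split₀.go.eq_def]
    by_cases hs : PySem.Chars.isspace c
    · by_cases hc : cur.isEmpty
      · simp only [hs, hc, if_pos]
        exact ih [] acc
      · simp only [hs, hc, if_neg, Bool.false_eq_true, if_pos]
        rw [ih [] (cur.reverse :: acc), ih [] [cur.reverse]]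
        simp
    · simp only [hs, Bool.false_eq_true, if_neg]
      exact ih (c :: cur) acc

theorem pv_split0_lstrip (q : List Char) :
    PySem.Chars.split₀ q =
      PySem.Chars.split₀ (q.dropWhile (fun c => PySem.Chars.isspace c)) := by
  induction q with
  | nil => simp
  | cons c rest ih =>
    by_cases hs : PySem.Chars.isspace c
    · rw [PySem.Chars.split₀, PySem.Chars.split₀.go.eq_def]
      simp only [hs, if_pos, List.isEmpty_nil]
      rw [List.dropWhile_cons_of_pos (by simpa using hs)]
      exact ih
    · rw [List.dropWhile_cons_of_neg (by simpa using hs)]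

theorem pv_split0_go_word :
    ∀ (rest cur : List Char), cur ≠ [] →
      PySem.Chars.split₀.go rest cur [] =
        (cur.reverse ++ rest.takeWhile (fun c => !PySem.Chars.isspace c)) ::
          PySem.Chars.split₀ (rest.dropWhile (fun c => !PySem.Chars.isspace c)) := by
  intro rest
  induction rest with
  | nil =>
    intro cur hc
    rw [PySem.Chars.split₀.go.eq_def]
    simp [List.isEmpty_iff, hc, PySem.Chars.split₀, PySem.Chars.split₀.go]
  | cons d t ih =>
    intro cur hc
    rw [PySem.Chars.split₀.go.eq_def]
    by_cases hs : PySem.Chars.isspace d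
    · simp only [hs, if_pos, List.isEmpty_iff, hc, if_neg]
      rw [List.takeWhile_cons_of_neg (by simp [hs]), List.dropWhile_cons_of_neg (by simp [hs])]
      have h2 : PySem.Chars.split₀ (d :: t) = PySem.Chars.split₀.go t [] [] := by
        rw [PySem.Chars.split₀, PySem.Chars.split₀.go.eq_def]
        simp [hs]
      rw [h2, pv_split0_go_acc t [] [cur.reverse]]
      simp
    · simp only [hs, Bool.false_eq_true, if_neg]
      rw [ih (d :: cur) (by simp),
        List.takeWhile_cons_of_pos (by simp [hs]), List.dropWhile_cons_of_pos (by simp [hs])]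
      simp

theorem pv_dropWhile_head (p : Char → Bool) :
    ∀ (q : List Char) (c : Char) (r : List Char), q.dropWhile p = c :: r → p c = false := by
  intro q
  induction q with
  | nil => intro c r h; simp at h
  | cons a t ih =>
    intro c r h
    by_cases hp : p a
    · rw [List.dropWhile_cons_of_pos hp] at h
      exact ih _ _ h
    · rw [List.dropWhile_cons_of_neg hp] at h
      cases h
      simpa using hp

theorem pv_split0_head (q : List Char) :
    (PySem.Chars.split₀ q).head? = if pvW q = [] then none else some (pvW q) := by
  rw [pv_split0_lstrip]
  unfold pvW
  cases hq : q.dropWhile (fun c => PySem.Chars.isspace c) with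
  | nil => simp [PySem.Chars.split₀, PySem.Chars.split₀.go]
  | cons c r =>
    have hc : PySem.Chars.isspace c = false := pv_dropWhile_head _ q c r hq
    rw [PySem.Chars.split₀, PySem.Chars.split₀.go.eq_def]
    simp only [hc, Bool.false_eq_true, if_neg, List.isEmpty_nil]
    rw [pv_split0_go_word r [c] (by simp)]
    rw [List.takeWhile_cons_of_pos (by simp [hc])]
    simp

theorem pv_rstrip_cons (d : Char) (t : List Char) :
    PySem.Chars.rstrip (d :: t) =
      if PySem.Chars.rstrip t = [] then (if PySem.Chars.isspace d then [] else [d])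
      else d :: PySem.Chars.rstrip t := by
  unfold PySem.Chars.rstrip
  rw [List.reverse_cons, List.dropWhile_append]
  by_cases he : (List.dropWhile PySem.Chars.isspace t.reverse).isEmpty
  · rw [if_pos he]
    have ht : (List.dropWhile PySem.Chars.isspace t.reverse).reverse = [] := by
      simp [List.isEmpty_iff.mp he]
    rw [if_pos ht]
    by_cases hd : PySem.Chars.isspace d <;> simp [hd]
  · rw [if_neg he]
    have ht : (List.dropWhile PySem.Chars.isspace t.reverse).reverse ≠ [] := by
      simp [List.isEmpty_iff] at he
      simpa using he
    rw [if_neg ht]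
    simp

theorem pv_takeWhile_rstrip (t : List Char) :
    (PySem.Chars.rstrip t).takeWhile (fun c => !PySem.Chars.isspace c) =
      t.takeWhile (fun c => !PySem.Chars.isspace c) := by
  induction t with
  | nil => simp [PySem.Chars.rstrip]
  | cons d t ih =>
    rw [pv_rstrip_cons]
    by_cases hd : PySem.Chars.isspace d
    · rw [List.takeWhile_cons_of_neg (by simp [hd])]
      by_cases he : PySem.Chars.rstrip t = []
      · simp [he, hd]
      · rw [if_neg he, List.takeWhile_cons_of_neg (by simp [hd])]
    · by_cases he : PySem.Chars.rstrip t = []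
      · rw [if_pos he, if_neg hd, List.takeWhile_cons_of_pos (by simp [hd]),
          List.takeWhile_cons_of_pos (by simp [hd])]
        rw [he] at ih
        simp at ih ⊢
        exact ih
      · rw [if_neg he, List.takeWhile_cons_of_pos (by simp [hd]),
          List.takeWhile_cons_of_pos (by simp [hd]), ih]

theorem pv_W_strip (q : List Char) : pvW (PySem.Chars.strip q) = pvW q := by
  unfold PySem.Chars.strip
  induction q with
  | nil => simp [PySem.Chars.lstrip, PySem.Chars.rstrip, pvW]
  | cons c t ih =>
    by_cases hc : PySem.Chars.isspace c
    · have hl : PySem.Chars.lstrip (c :: t) = PySem.Chars.lstrip t := by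
        simp [PySem.Chars.lstrip, List.dropWhile_cons_of_pos hc]
      have hW : pvW (c :: t) = pvW t := by
        unfold pvW
        rw [List.dropWhile_cons_of_pos hc]
      rw [hl, hW, ih]
    · have hl : PySem.Chars.lstrip (c :: t) = c :: t := by
        simp [PySem.Chars.lstrip, List.dropWhile_cons_of_neg hc]
      rw [hl, pv_rstrip_cons]
      by_cases he : PySem.Chars.rstrip t = []
      · rw [if_pos he, if_neg hc]
        have h0 : t.takeWhile (fun c => !PySem.Chars.isspace c) = [] := by
          have h1 := pv_takeWhile_rstrip t
          rw [he] at h1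
          simpa using h1.symm
        simp [pvW, List.dropWhile_cons, List.takeWhile_cons, hc, h0]
      · rw [if_neg he]
        simp [pvW, List.dropWhile_cons, List.takeWhile_cons, hc, pv_takeWhile_rstrip]

-- B's one-segment update is A's per-part body
theorem pv_step (banned : List (List Char)) (t : PySem.Set (List Char)) (seg : List Char) :
    (if (seg.dropWhile (fun c => PySem.Chars.isspace c)).takeWhile
          (fun c => !PySem.Chars.isspace c) ≠ [] ∧
        banned.contains ((seg.dropWhile (fun c => PySem.Chars.isspace c)).takeWhile
          (fun c => !PySem.Chars.isspace c)) = false then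
        PySem.Set.add t (PySem.Chars.stripChars
          ((seg.dropWhile (fun c => PySem.Chars.isspace c)).takeWhile
            (fun c => !PySem.Chars.isspace c)) ("(),;".toList))
      else t) = pvProc banned t seg := by
  have hW : (seg.dropWhile (fun c => PySem.Chars.isspace c)).takeWhile
      (fun c => !PySem.Chars.isspace c) = pvW seg := rfl
  have hh := pv_split0_head (PySem.Chars.strip seg)
  rw [pv_W_strip] at hh
  unfold pvProc
  rw [hW]
  by_cases h0 : pvW seg = []
  · have : PySem.Chars.split₀ (PySem.Chars.strip seg) = [] := by
      rw [if_pos h0] at hh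
      exact List.head?_eq_none_iff.mp hh
    rw [this]
    simp [h0]
  · rw [if_neg h0] at hh
    obtain ⟨tl, htl⟩ : ∃ tl, PySem.Chars.split₀ (PySem.Chars.strip seg) = pvW seg :: tl := by
      cases hq : PySem.Chars.split₀ (PySem.Chars.strip seg) with
      | nil => rw [hq] at hh; simp at hh
      | cons a b =>
        rw [hq] at hh
        simp at hh
        exact ⟨b, by rw [hh]⟩
    rw [htl]
    by_cases hb : banned.contains (pvW seg) <;> simp [hb, h0]

-- main loop correspondence
theorem pv_key (kw : List Char) (hkw : kw ≠ []) (banned : List (List Char)) :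
    ∀ (text : List Char) (targets : PySem.Set (List Char)),
      pvScanKw kw banned text targets =
        ((PySem.Chars.splitOn text kw).drop 1).foldl (pvProc banned) targets := by
  have main : ∀ (n : Nat) (text : List Char), text.length ≤ n →
      ∀ targets, pvScanKw kw banned text targets =
        ((PySem.Chars.splitOn text kw).drop 1).foldl (pvProc banned) targets := by
    intro n
    induction n with
    | zero =>
      intro text hlen targets
      have htext : text = [] := List.eq_nil_of_length_eq_zero (by omega)
      subst htext
      rw [pvScanKw]
      simp [hkw, pv_find_nil hkw, pv_splitOn_no_occ hkw (pv_find_nil hkw)]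
    | succ n ih =>
      intro text hlen targets
      rw [pvScanKw]
      by_cases hf : PySem.Chars.find text kw = -1
      · simp [hkw, hf, pv_splitOn_no_occ hkw hf]
      · simp only [hkw, dif_neg, hf, dite_false, not_false_eq_true]
        set i := (PySem.Chars.find text kw).toNat with hi
        set rest := text.drop (i + kw.length) with hrest
        have hkl : 0 < kw.length := List.length_pos_iff.mpr hkw
        have htext : text ≠ [] := by
          intro h0
          rw [h0] at hf
          exact hf (pv_find_nil hkw)
        have hrl : rest.length ≤ n := by
          have : 0 < text.length := List.length_pos_iff.mpr htext
          rw [hrest]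
          simp only [List.length_drop]
          omega
        have hsplit := pv_splitOn_occ hkw (l := text) hf
        have hdrop1 : (PySem.Chars.splitOn text kw).drop 1 = PySem.Chars.splitOn rest kw := by
          rw [hsplit]
          rfl
        set seg := if PySem.Chars.find rest kw = -1 then rest
          else rest.take (PySem.Chars.find rest kw).toNat with hseg
        have hcons : PySem.Chars.splitOn rest kw =
            seg :: (PySem.Chars.splitOn rest kw).drop 1 := by
          by_cases hn2 : PySem.Chars.find rest kw = -1
          · rw [pv_splitOn_no_occ hkw hn2, hseg, if_pos hn2]
            rfl
          · rw [pv_splitOn_occ hkw hn2, hseg, if_neg hn2]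
            rfl
        rw [hdrop1]
        conv_rhs => rw [hcons]
        rw [List.foldl_cons, ← ih rest hrl, pv_step banned targets seg]
  intro text targets
  exact main text.length text le_rfl targets

-- A's guarded block for one keyword is B's scan
theorem pv_block (kw : List Char) (hkw : kw ≠ []) (banned : List (List Char))
    (q : List Char) (targets : PySem.Set (List Char)) :
    (if PySem.Chars.isIn kw q then
        ((PySem.Chars.splitOn q kw).drop 1).foldl (pvProc banned) targets
      else targets) = pvScanKw kw banned q targets := by
  by_cases hin : PySem.Chars.isIn kw q
  · rw [if_pos hin, pv_key kw hkw banned]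
  · rw [if_neg hin]
    have hf : PySem.Chars.find q kw = -1 := by
      unfold PySem.Chars.isIn at hin
      simpa using hin
    rw [pvScanKw]
    simp [hkw, hf]

-- A's INSERT/MERGE fold body is pvProc []
theorem pv_body_nob :
    (fun (t : PySem.Set (List Char)) part =>
      match PySem.Chars.split₀ (PySem.Chars.strip part) with
      | [] => t
      | tok :: _ => PySem.Set.add t (PySem.Chars.stripChars tok ("(),;".toList))) =
    pvProc [] := by
  funext t part
  unfold pvProc
  cases PySem.Chars.split₀ (PySem.Chars.strip part) <;> simp

-- A's CREATE TABLE fold body is pvProc ["IF","OR"]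
theorem pv_body_cr :
    (fun (t : PySem.Set (List Char)) part =>
      match PySem.Chars.split₀ (PySem.Chars.strip part) with
      | [] => t
      | tok :: _ =>
        if ["IF".toList, "OR".toList].contains tok then t
        else PySem.Set.add t (PySem.Chars.stripChars tok ("(),;".toList))) =
    pvProc ["IF".toList, "OR".toList] := by
  funext t part
  unfold pvProc
  cases PySem.Chars.split₀ (PySem.Chars.strip part) <;> simp

-- ===== VERDICT (by name: the statement is the Claim_ definition above) =====
theorem extract_target_tables_py_spec : Claim_equal_extract_target_tables_py := by
  unfold Claim_equal_extract_target_tables_py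
  intro query_text _
  unfold Spec_extract_target_tables_py
  unfold extract_target_tables_py extract_target_tables_py_alt
  simp only [List.foldl_cons, List.foldl_nil]
  rw [pv_body_nob, pv_body_cr]
  rw [pv_block ("INSERT INTO".toList) (by decide) [] _ _,
    pv_block ("CREATE TABLE".toList) (by decide) ["IF".toList, "OR".toList] _ _,
    pv_block ("MERGE INTO".toList) (by decide) [] _ _]
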